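-- pv_equiv track=rewrite | github.com/fermihacker/ProjectEuler100 | Problem063.py | loop
-- ===== SOURCE A (Python) =====
-- def digits(n):
--     s=[]
--     k=n
--     while(k>0):
--         s.append(k%10)
--         k//=10
--     return len(s)
--
-- def loop(n):
--     a = 0
--     b = 0
--     s=[]
--     while (a <= n):
--         while (b <= n):
--             if(digits(a**b)==b):
--                 s.append(a**b)
--             else:
--                 pass
--             b+=1
--         b=1
--         a+=1
--     return s
-- ===== SOURCE B (Python) =====
-- def loop(n):
--     # a^b has exactly b digits only when 1 <= a <= 9; for fixed a the property
--     # holds for a prefix of b values (10^(b-1) <= a^b is monotone-failing), so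
--     # iterate a in 1..min(n,9) and stop b at the first failure.
--     s = []
--     for a in range(1, min(n, 9) + 1):
--         b = 1
--         while b <= n and a ** b >= 10 ** (b - 1):
--             s.append(a ** b)
--             b += 1
--     return s
-- ===== Notes on version B (the rewrite author's own statement) =====
-- stated objective: faster
-- what changed: Instead of scanning all (a,b) in [0,n]^2 with big-int powers, B iterates only a in 1..min(n,9) (a^b can have b digits only for 1<=a<=9) and stops b at the first failure of 10^(b-1) <= a^b, which is monotone, preserving the output order.
import Mathlib
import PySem

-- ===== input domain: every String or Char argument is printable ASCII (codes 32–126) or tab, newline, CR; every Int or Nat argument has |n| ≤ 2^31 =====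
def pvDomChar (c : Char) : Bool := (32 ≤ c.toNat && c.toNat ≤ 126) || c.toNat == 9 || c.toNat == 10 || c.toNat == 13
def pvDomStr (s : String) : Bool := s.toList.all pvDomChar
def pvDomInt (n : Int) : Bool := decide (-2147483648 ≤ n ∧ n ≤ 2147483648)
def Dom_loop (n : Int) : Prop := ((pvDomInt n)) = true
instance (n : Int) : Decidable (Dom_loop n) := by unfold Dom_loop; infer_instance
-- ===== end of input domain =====

-- B replaces A's O(n^2) double scan with big-int powers by iterating a only in
-- 1..min(n,9) and stopping b at the first failure of 10^(b-1) <= a^b (objective: faster).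

-- ===== PORT A =====
-- while(k>0): s.append(k%10); k//=10
def digitsGo (k : Int) (s : List Int) : List Int :=
  if 0 < k then digitsGo (PySem.Int.floordiv k 10) (s ++ [PySem.Int.mod k 10]) else s
termination_by k.toNat
decreasing_by
  rw [PySem.Int.floordiv_eq_ediv_of_pos (by norm_num : (0:Int) < 10)]
  omega

def digits (n : Int) : Int := ((digitsGo n []).length : Int)

-- inner while (b <= n)
def innerA (n a b : Int) (s : List Int) : List Int :=
  if b ≤ n then
    innerA n a (b + 1) (if digits (a ^ b.toNat) = b then s ++ [a ^ b.toNat] else s)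
  else s
termination_by (n + 1 - b).toNat
decreasing_by omega

-- outer while (a <= n); after the first pass b is reset to 1
def outerA (n a b : Int) (s : List Int) : List Int :=
  if a ≤ n then outerA n (a + 1) 1 (innerA n a b s) else s
termination_by (n + 1 - a).toNat
decreasing_by omega

def loop (n : Int) : List Int := outerA n 0 0 []

-- ===== PORT B =====
-- while b <= n and a ** b >= 10 ** (b - 1): s.append(a ** b); b += 1
def innerB (n a b : Int) (s : List Int) : List Int :=
  if b ≤ n ∧ (10:Int) ^ (b - 1).toNat ≤ a ^ b.toNat then
    innerB n a (b + 1) (s ++ [a ^ b.toNat])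
  else s
termination_by (n + 1 - b).toNat
decreasing_by omega

-- for a in range(1, min(n, 9) + 1): ...
def loop_alt (n : Int) : List Int :=
  (PySem.List.pyRange 1 (min n 9 + 1) 1).foldl (fun s a => innerB n a 1 s) []

-- ===== PRECONDITION & SPEC =====
def Spec_loop (n : Int) (out : List Int) : Prop := out = loop_alt n
instance (n : Int) (out : List Int) : Decidable (Spec_loop n out) := by unfold Spec_loop; infer_instance

-- ===== CLAIM (what is proved, stated in full; the proofs are below) =====
def Claim_equal_loop : Prop := ∀ (n : Int), Dom_loop n → Spec_loop n (loop n)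

-- ===== LEMMAS AND PROOFS =====

theorem digits_nonneg (k : Int) : 0 ≤ digits k := by
  unfold digits; positivity

theorem digits_nonpos (k : Int) (h : k ≤ 0) : digits k = 0 := by
  unfold digits; rw [digitsGo]; simp [show ¬ 0 < k by omega]

theorem digits_step (k : Int) (h : 0 < k) :
    digits k = digits (PySem.Int.floordiv k 10) + 1 := by
  have hlen : ∀ (m : Int) (s : List Int),
      (digitsGo m s).length = s.length + (digitsGo m []).length := by
    intro m
    generalize hf : m.toNat = fuel
    induction fuel using Nat.strong_induction_on generalizing m with
    | _ fuel ih =>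
      intro s
      rw [digitsGo]
      by_cases hm : 0 < m
      · have hdiv : PySem.Int.floordiv m 10 = m / 10 :=
          PySem.Int.floordiv_eq_ediv_of_pos (by norm_num)
        have hlt : (m / 10).toNat < fuel := by rw [hdiv] at *; omega
        simp only [hm, if_true]
        rw [hdiv]
        rw [ih _ hlt _ rfl (s ++ [PySem.Int.mod m 10])]
        conv_rhs => rw [digitsGo]
        simp only [hm, if_true]
        rw [hdiv]
        rw [ih _ hlt _ rfl ([] ++ [PySem.Int.mod m 10])]
        simp
        omega
      · have : digitsGo m [] = [] := by rw [digitsGo]; simp [hm]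
        simp [hm, this]
  unfold digits
  rw [digitsGo]
  simp only [h, if_true]
  rw [hlen]
  simp
  omega

theorem digits_lt (c : Nat) : ∀ k : Int, k < 10 ^ c → digits k ≤ (c : Int) := by
  induction c with
  | zero =>
    intro k hk
    rw [digits_nonpos k (by simp at hk; omega)]
    simp
  | succ c ih =>
    intro k hk
    by_cases hp : 0 < k
    · rw [digits_step k hp]
      have hdiv : PySem.Int.floordiv k 10 = k / 10 :=
        PySem.Int.floordiv_eq_ediv_of_pos (by norm_num)
      have h10 : (10:Int) ^ (c + 1) = 10 * 10 ^ c := by ring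
      have hrec : k / 10 < 10 ^ c := by
        have hc : (0:Int) < 10 ^ c := by positivity
        omega
      have := ih (k / 10) hrec
      rw [hdiv]
      push_cast
      omega
    · rw [digits_nonpos k (by omega)]
      positivity

theorem digits_ge (c : Nat) : ∀ k : Int, 10 ^ c ≤ k → (c : Int) + 1 ≤ digits k := by
  induction c with
  | zero =>
    intro k hk
    rw [digits_step k (by simp at hk; omega)]
    have := digits_nonneg (PySem.Int.floordiv k 10)
    omega
  | succ c ih =>
    intro k hk
    have hc : (0:Int) < 10 ^ c := by positivity
    have hp : 0 < k := by
      have : (10:Int) ^ (c + 1) = 10 * 10 ^ c := by ring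
      omega
    rw [digits_step k hp]
    have hdiv : PySem.Int.floordiv k 10 = k / 10 :=
      PySem.Int.floordiv_eq_ediv_of_pos (by norm_num)
    have hrec : (10:Int) ^ c ≤ k / 10 := by
      have h10 : (10:Int) ^ (c + 1) = 10 * 10 ^ c := by ring
      omega
    have := ih (k / 10) hrec
    rw [hdiv]
    push_cast
    omega

-- For 1 ≤ a ≤ 9 and b ≥ 1, a^b always has at most b digits, so the digit
-- condition is exactly the lower bound 10^(b-1) ≤ a^b.
theorem cond_iff (a b : Int) (ha : 1 ≤ a) (ha9 : a ≤ 9) (hb : 1 ≤ b) :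
    digits (a ^ b.toNat) = b ↔ (10:Int) ^ (b - 1).toNat ≤ a ^ b.toNat := by
  set e := (b - 1).toNat with he
  have heb : b = (e : Int) + 1 := by omega
  have hbn : b.toNat = e + 1 := by omega
  have hub : a ^ b.toNat < 10 ^ (e + 1) := by
    rw [hbn]
    exact pow_lt_pow_left₀ (by omega) (by omega) (by omega)
  constructor
  · intro hd
    by_contra hnot
    have := digits_lt e (a ^ b.toNat) (by omega)
    omega
  · intro hge
    have h1 := digits_ge e (a ^ b.toNat) hge
    have h2 := digits_lt (e + 1) (a ^ b.toNat) hub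
    push_cast at h1 h2
    omega

-- once 10^(b-1) ≤ a^b fails it fails for every larger b (1 ≤ a ≤ 9)
theorem fail_mono (a : Int) (ha : 1 ≤ a) (ha9 : a ≤ 9) :
    ∀ (b b' : Int), 1 ≤ b → b ≤ b' →
      a ^ b.toNat < (10:Int) ^ (b - 1).toNat →
      a ^ b'.toNat < (10:Int) ^ (b' - 1).toNat := by
  intro b b' hb hle
  generalize hd : (b' - b).toNat = d
  induction d generalizing b' with
  | zero =>
    have : b' = b := by omega
    subst this; exact fun h => h
  | succ d ih =>
    intro hfail
    have hstep := ih (b' - 1) (by omega) (by omega) hfail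
    have hprev : a ^ (b' - 1).toNat < (10:Int) ^ (b' - 1 - 1).toNat := hstep
    have h1 : b'.toNat = (b' - 1).toNat + 1 := by omega
    have h2 : (b' - 1).toNat = (b' - 1 - 1).toNat + 1 := by omega
    calc a ^ b'.toNat = a * a ^ (b' - 1).toNat := by rw [h1]; ring
      _ < 10 * 10 ^ (b' - 1 - 1).toNat :=
          mul_lt_mul' (by omega) hprev (by positivity) (by norm_num)
      _ = 10 ^ (b' - 1).toNat := by rw [h2]; ring

-- accumulator lemmas
theorem innerA_acc (n a : Int) : ∀ (b : Int) (s : List Int),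
    innerA n a b s = s ++ innerA n a b [] := by
  intro b
  generalize hf : (n + 1 - b).toNat = fuel
  induction fuel generalizing b with
  | zero =>
    intro s
    conv_lhs => rw [innerA]
    conv_rhs => rw [innerA]
    simp [show ¬ b ≤ n by omega]
  | succ m ih =>
    intro s
    conv_lhs => rw [innerA]
    conv_rhs => rw [innerA]
    by_cases hb : b ≤ n
    · simp only [hb, if_true]
      rw [ih (b + 1) (by omega), ih (b + 1) (by omega)
        (s := if digits (a ^ b.toNat) = b then [] ++ [a ^ b.toNat] else [])]
      by_cases hc : digits (a ^ b.toNat) = b <;> simp [hc]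
    · simp [hb]

theorem innerB_acc (n a : Int) : ∀ (b : Int) (s : List Int),
    innerB n a b s = s ++ innerB n a b [] := by
  intro b
  generalize hf : (n + 1 - b).toNat = fuel
  induction fuel generalizing b with
  | zero =>
    intro s
    conv_lhs => rw [innerB]
    conv_rhs => rw [innerB]
    simp [show ¬ b ≤ n by omega]
  | succ m ih =>
    intro s
    conv_lhs => rw [innerB]
    conv_rhs => rw [innerB]
    by_cases hb : b ≤ n ∧ (10:Int) ^ (b - 1).toNat ≤ a ^ b.toNat
    · simp only [hb]
      rw [ih (b + 1) (by omega), ih (b + 1) (by omega) (s := [] ++ [a ^ b.toNat])]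
      simp
    · rw [if_neg hb, if_neg hb]
      simp

theorem outerA_acc (n : Int) : ∀ (a : Int) (b : Int) (s : List Int),
    outerA n a b s = s ++ outerA n a b [] := by
  intro a
  generalize hf : (n + 1 - a).toNat = fuel
  induction fuel generalizing a with
  | zero =>
    intro b s
    conv_lhs => rw [outerA]
    conv_rhs => rw [outerA]
    simp [show ¬ a ≤ n by omega]
  | succ m ih =>
    intro b s
    conv_lhs => rw [outerA]
    conv_rhs => rw [outerA]
    by_cases hA : a ≤ n
    · simp only [hA, if_true]
      rw [ih (a + 1) (by omega), ih (a + 1) (by omega) (b := 1) (s := innerA n a b [])]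
      rw [innerA_acc n a b s]
      simp
    · simp [hA]

-- after a failing b, the A-side inner loop appends nothing more (1 ≤ a ≤ 9)
theorem innerA_nil_of_fail (n a : Int) (ha : 1 ≤ a) (ha9 : a ≤ 9)
    (b : Int) (hb : 1 ≤ b) (hfail : a ^ b.toNat < (10:Int) ^ (b - 1).toNat) :
    ∀ (b' : Int), b ≤ b' → innerA n a b' [] = [] := by
  intro b'
  generalize hf : (n + 1 - b').toNat = fuel
  induction fuel generalizing b' with
  | zero =>
    intro _
    rw [innerA]
    simp [show ¬ b' ≤ n by omega]
  | succ m ih =>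
    intro hle
    rw [innerA]
    by_cases hB : b' ≤ n
    · have hfail' := fail_mono a ha ha9 b b' hb hle hfail
      have hnc : ¬ digits (a ^ b'.toNat) = b' := by
        rw [cond_iff a b' ha ha9 (by omega)]
        omega
      simp only [hB, if_true, hnc, if_false]
      exact ih (b' + 1) (by omega) (by omega)
    · simp [hB]

theorem inner_eq (n a : Int) (ha : 1 ≤ a) (ha9 : a ≤ 9) :
    ∀ (b : Int), 1 ≤ b → innerA n a b [] = innerB n a b [] := by
  intro b
  generalize hf : (n + 1 - b).toNat = fuel
  induction fuel generalizing b with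
  | zero =>
    intro _
    rw [innerA, innerB]
    simp [show ¬ b ≤ n by omega]
  | succ m ih =>
    intro hb
    rw [innerA, innerB]
    by_cases hB : b ≤ n
    · by_cases hc : (10:Int) ^ (b - 1).toNat ≤ a ^ b.toNat
      · have hd : digits (a ^ b.toNat) = b := (cond_iff a b ha ha9 hb).mpr hc
        simp only [hB, hc, and_self, if_true, hd]
        rw [innerA_acc, innerB_acc, ih (b + 1) (by omega) (by omega)]
      · have hd : ¬ digits (a ^ b.toNat) = b := by
          rw [cond_iff a b ha ha9 hb]; omega
        simp only [hB, hc, and_false, if_false, hd, if_true, if_false]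
        rw [innerA_nil_of_fail n a ha ha9 b hb (by omega) (b + 1) (by omega)]
    · simp [hB]

-- a = 0 contributes nothing (digits(0^0)=1≠0, digits(0)=0≠b for b≥1)
theorem innerA_zero (n : Int) : ∀ (b : Int), 0 ≤ b → innerA n 0 b [] = [] := by
  intro b
  generalize hf : (n + 1 - b).toNat = fuel
  induction fuel generalizing b with
  | zero =>
    intro _
    rw [innerA]
    simp [show ¬ b ≤ n by omega]
  | succ m ih =>
    intro hb
    rw [innerA]
    by_cases hB : b ≤ n
    · have hnc : ¬ digits ((0:Int) ^ b.toNat) = b := by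
        by_cases h0 : b = 0
        · subst h0
          have h1 : (0:Int) ^ (0:Int).toNat = 1 := by norm_num
          rw [h1]
          have := digits_ge 0 1 (by norm_num)
          omega
        · have h1 : (0:Int) ^ b.toNat = 0 := by
            rw [zero_pow (by omega : b.toNat ≠ 0)]
          rw [h1, digits_nonpos 0 le_rfl]
          omega
      simp only [hB, if_true, hnc, if_false]
      exact ih (b + 1) (by omega) (by omega)
    · simp [hB]

-- a ≥ 10 contributes nothing (a^b ≥ 10^b has more than b digits)
theorem innerA_big (n a : Int) (ha : 10 ≤ a) :
    ∀ (b : Int), 1 ≤ b → innerA n a b [] = [] := by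
  intro b
  generalize hf : (n + 1 - b).toNat = fuel
  induction fuel generalizing b with
  | zero =>
    intro _
    rw [innerA]
    simp [show ¬ b ≤ n by omega]
  | succ m ih =>
    intro hb
    rw [innerA]
    by_cases hB : b ≤ n
    · have hge : (10:Int) ^ b.toNat ≤ a ^ b.toNat :=
        pow_le_pow_left₀ (by norm_num) ha _
      have hnc : ¬ digits (a ^ b.toNat) = b := by
        have := digits_ge b.toNat (a ^ b.toNat) hge
        omega
      simp only [hB, if_true, hnc, if_false]
      exact ih (b + 1) (by omega) (by omega)
    · simp [hB]

theorem foldl_innerB (n : Int) : ∀ (l : List Int) (s : List Int),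
    l.foldl (fun s x => innerB n x 1 s) s = s ++ l.flatMap (fun x => innerB n x 1 []) := by
  intro l
  induction l with
  | nil => intro s; simp
  | cons x xs ih =>
    intro s
    simp only [List.foldl_cons, List.flatMap_cons]
    rw [ih, innerB_acc]
    simp

theorem outer_eq (n : Int) : ∀ (a : Int), 1 ≤ a →
    outerA n a 1 [] =
      (PySem.List.pyRange a (min n 9 + 1) 1).flatMap (fun x => innerB n x 1 []) := by
  intro a
  generalize hf : (n + 1 - a).toNat = fuel
  induction fuel generalizing a with
  | zero =>
    intro _
    rw [outerA]
    rw [PySem.List.pyRange_one_eq_nil (by omega : min n 9 + 1 ≤ a)]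
    simp [show ¬ a ≤ n by omega]
  | succ m ih =>
    intro ha
    rw [outerA]
    by_cases hA : a ≤ n
    · simp only [hA, if_true]
      rw [outerA_acc, ih (a + 1) (by omega) (by omega)]
      by_cases h9 : a ≤ 9
      · rw [PySem.List.pyRange_one_cons (by omega : a < min n 9 + 1)]
        rw [List.flatMap_cons, inner_eq n a ha h9 1 le_rfl]
      · rw [innerA_big n a (by omega) 1 le_rfl]
        rw [PySem.List.pyRange_one_eq_nil (by omega : min n 9 + 1 ≤ a),
            PySem.List.pyRange_one_eq_nil (by omega : min n 9 + 1 ≤ a + 1)]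
        simp
    · rw [PySem.List.pyRange_one_eq_nil (by omega : min n 9 + 1 ≤ a)]
      simp [hA]

-- ===== VERDICT (by name: the statement is the Claim_ definition above) =====
theorem loop_spec : Claim_equal_loop := by
  intro n _
  unfold Spec_loop loop loop_alt
  rw [foldl_innerB]
  by_cases hn : 0 ≤ n
  · rw [outerA]
    simp only [hn, if_true]
    rw [outerA_acc, innerA_zero n 0 le_rfl]
    norm_num
    rw [outer_eq n 1 le_rfl]
  · rw [outerA]
    rw [PySem.List.pyRange_one_eq_nil (by omega : min n 9 + 1 ≤ 1)]
    simp [show ¬ (0:Int) ≤ n by omega]
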